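-- pv_equiv track=rewrite | github.com/poojaspot/ViewDx_DOA_Panel | paneltestutils.py | panel_result
-- ===== SOURCE A (Python) =====
-- def panel_result(prefix_Text, results_dict, column_width=28):
--     results_list = list(results_dict.items())
--     num_results = len(results_list)
--     output_lines = []
--     header_indent = " " * 10
--     pairwidth = column_width*2
--
--     for i in range(0, num_results, 2):
--         prefix = str(prefix_Text) if i == 0 else header_indent
--         if i < num_results:
--             analyte1, result1 = results_list[i]
--             col1 = f"{analyte1}: {result1}".ljust(column_width)
--         else:
--             col1 = " ".ljust(column_width)
--         if i + 1 < num_results: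
--             analyte2, result2 = results_list[i + 1]
--             col2 = f"{analyte2}: {result2}"
--         else:
--             col2 = " "
--         col = (prefix+col1+col2).ljust(pairwidth)
--         output_lines.append(col)
-- #         output_lines.append(prefix + col1 + col2)
--     if not output_lines:
--         return "Results: No data available."
--     return "\n".join(output_lines)
-- ===== SOURCE B (Python) =====
-- def panel_result(prefix_Text, results_dict, column_width=28):
--     def cell(item):
--         analyte, result = item
--         return f"{analyte}: {result}"
--
--     def pairs(items):
--         if not items:
--             return []
--         if len(items) == 1:
--             return [(cell(items[0]), " ")]
--         return [(cell(items[0]), cell(items[1]))] + pairs(items[2:])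
--
--     ps = pairs(list(results_dict.items()))
--     if not ps:
--         return "Results: No data available."
--     lines = [((str(prefix_Text) if k == 0 else " " * 10) + c1.ljust(column_width) + c2).ljust(column_width * 2)
--              for k, (c1, c2) in enumerate(ps)]
--     return "\n".join(lines)
-- ===== Notes on version B (the rewrite author's own statement) =====
-- stated objective: simpler
-- what changed: A formats by indexing the items list with a range(0, n, 2) loop and in-loop bounds checks; B pairs the items by structural two-at-a-time recursion and maps the pairs to lines with enumerate, with no indexing or bounds checks.
import Mathlib
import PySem

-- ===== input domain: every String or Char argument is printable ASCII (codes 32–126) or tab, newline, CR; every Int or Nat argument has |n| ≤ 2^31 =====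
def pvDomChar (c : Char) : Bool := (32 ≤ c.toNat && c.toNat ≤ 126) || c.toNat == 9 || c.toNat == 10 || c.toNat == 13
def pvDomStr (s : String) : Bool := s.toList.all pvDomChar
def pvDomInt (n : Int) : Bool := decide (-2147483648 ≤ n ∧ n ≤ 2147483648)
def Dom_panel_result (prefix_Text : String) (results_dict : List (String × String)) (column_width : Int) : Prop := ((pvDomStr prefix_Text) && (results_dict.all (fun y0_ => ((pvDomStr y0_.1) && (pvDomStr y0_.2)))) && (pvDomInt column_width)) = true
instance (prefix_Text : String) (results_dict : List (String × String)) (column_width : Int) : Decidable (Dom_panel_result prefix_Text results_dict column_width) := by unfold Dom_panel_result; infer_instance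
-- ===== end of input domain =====

-- B replaces A's index-driven range(0, n, 2) loop with bounds checks by a structural
-- recursion that pairs the items two at a time (objective: simpler decomposition).


-- str.ljust(w) on code points (exact: pads with spaces up to w, unchanged if already long enough)
def pyLjust (cs : List Char) (w : Int) : List Char := cs ++ List.replicate (w.toNat - cs.length) ' '

-- ===== PORT A =====
def panel_result (prefix_Text : String) (results_dict : List (String × String)) (column_width : Int) : String :=
  let results_list := results_dict
  let num_results : Int := (results_list.length : Int)
  let header_indent : List Char := List.replicate 10 ' '
  let pairwidth : Int := column_width * 2
  let output_lines : List (List Char) :=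
    (PySem.List.pyRange 0 num_results 2).foldl
      (fun acc i =>
        let pre : List Char := if i == 0 then prefix_Text.toList else header_indent
        let col1 : List Char :=
          if i < num_results then
            match PySem.List.pyGet? results_list i with
            | some (a, r) => pyLjust (a.toList ++ [':', ' '] ++ r.toList) column_width
            | none => []        -- unreachable: i is in range here
          else pyLjust [' '] column_width
        let col2 : List Char :=
          if i + 1 < num_results then
            match PySem.List.pyGet? results_list (i + 1) with
            | some (a, r) => a.toList ++ [':', ' '] ++ r.toList
            | none => []        -- unreachable: i + 1 is in range here
          else [' ']
        acc ++ [pyLjust (pre ++ col1 ++ col2) pairwidth]) []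
  if output_lines = [] then "Results: No data available."
  else String.ofList (PySem.Chars.join ['\n'] output_lines)

-- ===== PORT B =====
def pvCell (item : String × String) : List Char := item.1.toList ++ [':', ' '] ++ item.2.toList

def pvPairs : List (String × String) → List (List Char × List Char)
  | [] => []
  | [x] => [(pvCell x, [' '])]
  | x :: y :: rest => (pvCell x, pvCell y) :: pvPairs rest

def panel_result_alt (prefix_Text : String) (results_dict : List (String × String)) (column_width : Int) : String :=
  let ps := pvPairs results_dict
  if ps = [] then "Results: No data available."
  else
    let lines := (PySem.List.enumerate ps).map
      (fun kp =>
        pyLjust ((if kp.1 == 0 then prefix_Text.toList else List.replicate 10 ' ')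
                  ++ pyLjust kp.2.1 column_width ++ kp.2.2) (column_width * 2))
    String.ofList (PySem.Chars.join ['\n'] lines)

-- ===== PRECONDITION & SPEC =====
def Spec_panel_result (prefix_Text : String) (results_dict : List (String × String)) (column_width : Int) (out : String) : Prop := out = panel_result_alt prefix_Text results_dict column_width
instance (prefix_Text : String) (results_dict : List (String × String)) (column_width : Int) (out : String) : Decidable (Spec_panel_result prefix_Text results_dict column_width out) := by unfold Spec_panel_result; infer_instance

-- ===== CLAIM (what is proved, stated in full; the proofs are below) =====
def Claim_equal_panel_result : Prop := ∀ (prefix_Text : String) (results_dict : List (String × String)) (column_width : Int), Dom_panel_result prefix_Text results_dict column_width → Spec_panel_result prefix_Text results_dict column_width (panel_result prefix_Text results_dict column_width)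

-- ===== LEMMAS AND PROOFS =====

-- one formatted line (common shape of both ports' per-line computation)
def pvLine (pre c1 c2 : List Char) (cw : Int) : List Char :=
  pyLjust (pre ++ pyLjust c1 cw ++ c2) (cw * 2)

-- B's lines, with an explicit "is this the first line" flag instead of the enumerate index
def pvMapLines (px : List Char) (cw : Int) : Bool → List (List Char × List Char) → List (List Char)
  | _, [] => []
  | first, p :: ps =>
      pvLine (if first then px else List.replicate 10 ' ') p.1 p.2 cw :: pvMapLines px cw false ps

lemma pyRange_two_nil (i n : Int) (h : ¬ i < n) : PySem.List.pyRange i n 2 = [] := by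
  rw [PySem.List.pyRange_of_pos _ _ (by norm_num)]
  simp [h]

lemma pyRange_two_cons (i n : Int) (h : i < n) :
    PySem.List.pyRange i n 2 = i :: PySem.List.pyRange (i + 2) n 2 := by
  rw [PySem.List.pyRange_of_pos _ _ (by norm_num), PySem.List.pyRange_of_pos _ _ (by norm_num)]
  rw [if_pos h]
  have key : ((n - i + 2 - 1)/2).toNat = (if i + 2 < n then ((n - (i+2) + 2 - 1)/2).toNat else 0) + 1 := by
    split_ifs with h2 <;> omega
  rw [key, List.range_succ_eq_map, List.map_cons, List.map_map]
  refine congrArg₂ _ (by omega) ?_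
  congr 1
  funext k
  simp [Function.comp]
  ring

lemma enum_map_indent (px : List Char) (cw : Int) (f : Int × (List Char × List Char) → List Char)
    (hf : ∀ kp, f kp = pvLine (if kp.1 == 0 then px else List.replicate 10 ' ') kp.2.1 kp.2.2 cw) :
    ∀ (ps : List (List Char × List Char)) (s : Int), 1 ≤ s →
    (PySem.List.enumerate ps s).map f = pvMapLines px cw false ps := by
  intro ps
  induction ps with
  | nil => intro s hs; simp [PySem.List.enumerate_nil, pvMapLines]
  | cons p ps ih =>
    intro s hs
    rw [PySem.List.enumerate_cons, List.map_cons, hf, ih (s + 1) (by omega)]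
    have : (s == 0) = false := by simp; omega
    simp [this, pvMapLines]

lemma enum_map_all (px : List Char) (cw : Int) (f : Int × (List Char × List Char) → List Char)
    (hf : ∀ kp, f kp = pvLine (if kp.1 == 0 then px else List.replicate 10 ' ') kp.2.1 kp.2.2 cw)
    (ps : List (List Char × List Char)) :
    (PySem.List.enumerate ps 0).map f = pvMapLines px cw true ps := by
  cases ps with
  | nil => simp [PySem.List.enumerate_nil, pvMapLines]
  | cons p ps =>
    rw [PySem.List.enumerate_cons, List.map_cons, hf,
        show ((0:Int) + 1) = 1 from rfl,
        enum_map_indent px cw f hf ps 1 (by omega)]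
    simp [pvMapLines]

lemma natCast_beq_zero (i : Nat) : (((i : Int)) == 0) = (i == 0) := by
  cases i with
  | zero => rfl
  | succ n => simp; omega

lemma loopA_eq (px : List Char) (cw : Int) (full : List (String × String)) :
    ∀ (l : List (String × String)) (i : Nat) (acc : List (List Char)),
    full.drop i = l →
    (PySem.List.pyRange (i : Int) (full.length : Int) 2).foldl
      (fun acc j =>
        acc ++ [pyLjust
          (((if j == 0 then px else List.replicate 10 ' ') ++
            (if j < (full.length : Int) then
              match PySem.List.pyGet? full j with
              | some (a, r) => pyLjust (a.toList ++ [':', ' '] ++ r.toList) cw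
              | none => []
            else pyLjust [' '] cw)) ++
            (if j + 1 < (full.length : Int) then
              match PySem.List.pyGet? full (j + 1) with
              | some (a, r) => a.toList ++ [':', ' '] ++ r.toList
              | none => []
            else [' '])) (cw * 2)]) acc
    = acc ++ pvMapLines px cw (i == 0) (pvPairs l) := by
  intro l
  induction l using pvPairs.induct with
  | case1 =>
    intro i acc h
    have hn : full.length ≤ i := by
      have := congrArg List.length h; simp at this; omega
    rw [pyRange_two_nil _ _ (by exact_mod_cast not_lt.mpr (by exact_mod_cast hn))]
    simp [pvPairs, pvMapLines]
  | case2 x =>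
    intro i acc h
    have hn : full.length = i + 1 := by
      have := congrArg List.length h
      simp at this; omega
    have hx : full[i]? = some x := by
      have : (full.drop i)[0]? = some x := by rw [h]; rfl
      simpa using this
    rw [pyRange_two_cons _ _ (by exact_mod_cast (by omega : i < full.length))]
    rw [List.foldl_cons, pyRange_two_nil _ _ (by omega)]
    simp only [List.foldl_nil]
    have hget : PySem.List.pyGet? full (i : Int) = some x := by
      rw [PySem.List.pyGet?_natCast, hx]
    rw [hget, if_pos (show (i : Int) < (full.length : Int) by exact_mod_cast (by omega : i < full.length)),
        if_neg (show ¬ (i : Int) + 1 < (full.length : Int) by omega)]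
    obtain ⟨a, r⟩ := x
    simp only [pvPairs, pvMapLines, pvLine, pvCell, natCast_beq_zero]
  | case3 x y rest ih =>
    intro i acc h
    have hn : full.length = i + 2 + rest.length := by
      have := congrArg List.length h
      simp at this; omega
    have hx : full[i]? = some x := by
      have : (full.drop i)[0]? = some x := by rw [h]; rfl
      simpa using this
    have hy : full[i + 1]? = some y := by
      have : (full.drop i)[1]? = some y := by rw [h]; rfl
      simpa [Nat.add_comm] using this
    have hdrop : full.drop (i + 2) = rest := by
      have : List.drop 2 (full.drop i) = rest := by rw [h]; rfl
      rw [List.drop_drop] at this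
      simpa [Nat.add_comm] using this
    rw [pyRange_two_cons _ _ (by exact_mod_cast (by omega : i < full.length))]
    rw [List.foldl_cons]
    have hget : PySem.List.pyGet? full (i : Int) = some x := by
      rw [PySem.List.pyGet?_natCast, hx]
    have hget2 : PySem.List.pyGet? full ((i : Int) + 1) = some y := by
      rw [show ((i : Int) + 1) = ((i + 1 : Nat) : Int) by push_cast; ring,
          PySem.List.pyGet?_natCast, hy]
    rw [hget, hget2,
        if_pos (show (i : Int) < (full.length : Int) by exact_mod_cast (by omega : i < full.length)),
        if_pos (show (i : Int) + 1 < (full.length : Int) by omega)]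
    rw [show ((i : Int) + 2) = (((i + 2 : Nat)) : Int) by push_cast; ring,
        ih (i + 2) _ hdrop]
    obtain ⟨a, r⟩ := x
    obtain ⟨a2, r2⟩ := y
    simp only [pvPairs, pvMapLines, pvLine, pvCell, natCast_beq_zero,
               show ((i + 2 : Nat) == 0) = false by simp]
    simp [List.append_assoc]

-- ===== VERDICT (by name: the statement is the Claim_ definition above) =====
theorem panel_result_spec : Claim_equal_panel_result := by
  intro px results cw _
  unfold Spec_panel_result panel_result panel_result_alt
  have hA := loopA_eq px.toList cw results results 0 [] (by simp)
  simp only [Nat.cast_zero] at hA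
  simp only []
  rw [hA, List.nil_append]
  rw [enum_map_all px.toList cw
        (fun kp => pyLjust ((if kp.1 == 0 then px.toList else List.replicate 10 ' ')
          ++ pyLjust kp.2.1 cw ++ kp.2.2) (cw * 2)) (fun kp => rfl) (pvPairs results)]
  cases hps : pvPairs results with
  | nil =>
    have : results = [] := by
      cases results with
      | nil => rfl
      | cons z zs => cases zs <;> simp [pvPairs] at hps
    subst this
    simp [pvMapLines]
  | cons p ps =>
    simp [pvMapLines]
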